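-- pv_equiv track=rewrite | github.com/markoandjel/Artificial_Intelligence | Projekat/domineering.py | odredi_heuristiku2
-- ===== SOURCE A (Python) =====
-- def odredi_heuristiku2(stanje,x_max):
--     x_linija=0
--     o_linija=0
--     prazna_mesta=0
--     for vrsta in range(len(stanje)):
--         for kolona in range(len(stanje[vrsta])):
--             if kolona<len(stanje[vrsta])-1:
--                 if stanje[vrsta][kolona]==1 and stanje[vrsta][kolona+1]==1:
--                     x_linija+=1
--                 elif stanje[vrsta][kolona]==0 and stanje[vrsta][kolona+1]==0:
--                     o_linija+=1
--             if vrsta<len(stanje)-1: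
--                 if stanje[vrsta][kolona]==1 and stanje[vrsta+1][kolona]==1:
--                     x_linija+=1
--                 elif vrsta < len(stanje)-1 and stanje[vrsta][kolona]==0 and stanje[vrsta+1][kolona]==0:
--                     o_linija+=1
--             if(stanje[vrsta][kolona] is None):
--                 prazna_mesta+=1
--
--     return (x_linija-o_linija)*prazna_mesta if x_max==True else (o_linija-x_linija)*prazna_mesta
-- ===== SOURCE B (Python) =====
-- def _parovi_linije(linija):
--     # run-length encoding: each maximal run of k equal cells valued 1 (resp. 0)
--     # contributes k-1 adjacent pairs
--     x = 0
--     o = 0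
--     i = 0
--     n = len(linija)
--     while i < n:
--         v = linija[i]
--         j = i + 1
--         while j < n and linija[j] == v:
--             j += 1
--         if v == 1:
--             x += j - i - 1
--         elif v == 0:
--             o += j - i - 1
--         i = j
--     return (x, o)
--
--
-- def odredi_heuristiku2(stanje, x_max):
--     x = 0
--     o = 0
--     # horizontal pairs: run-length encode each row
--     for linija in stanje:
--         dx, do = _parovi_linije(linija)
--         x += dx
--         o += do
--     # vertical pairs: materialise the columns, run-length encode each
--     max_k = 0
--     for r in stanje:
--         if len(r) > max_k:
--             max_k = len(r)
--     for j in range(max_k):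
--         kolona = [r[j] for r in stanje if j < len(r)]
--         dx, do = _parovi_linije(kolona)
--         x += dx
--         o += do
--     # empty cells
--     prazna = 0
--     for r in stanje:
--         prazna += r.count(None)
--     d = x - o
--     return d * prazna if x_max == True else -d * prazna
-- ===== Notes on version B (the rewrite author's own statement) =====
-- stated objective: alternative
-- what changed: A's fused per-cell loop comparing each cell with its right and lower neighbour is replaced by run-length encoding: each row, and each explicitly materialised column list, is split into maximal runs of equal cells, a run of length k of 1s (0s) contributing k-1 pairs; empty cells are totalled per row with list.count.
import Mathlib
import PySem

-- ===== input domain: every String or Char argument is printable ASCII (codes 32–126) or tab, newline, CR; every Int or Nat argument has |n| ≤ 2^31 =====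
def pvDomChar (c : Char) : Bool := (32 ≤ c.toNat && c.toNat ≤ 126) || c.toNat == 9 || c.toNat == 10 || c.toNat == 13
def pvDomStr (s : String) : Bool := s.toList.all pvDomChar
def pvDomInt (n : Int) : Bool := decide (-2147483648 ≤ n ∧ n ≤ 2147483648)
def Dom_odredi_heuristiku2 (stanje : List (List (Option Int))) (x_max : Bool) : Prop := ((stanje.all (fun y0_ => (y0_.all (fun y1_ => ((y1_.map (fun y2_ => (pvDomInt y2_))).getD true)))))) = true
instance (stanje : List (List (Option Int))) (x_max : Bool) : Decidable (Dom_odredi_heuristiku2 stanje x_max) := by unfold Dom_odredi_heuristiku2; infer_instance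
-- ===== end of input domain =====

-- B replaces A's fused per-cell neighbour comparisons by a run-length algorithm:
-- rows and explicitly materialised column lists are split into maximal runs of
-- equal cells (a run of k 1s/0s contributes k-1 pairs); empty cells are counted per row.

-- ===== PORT A =====
-- the inner 'for kolona in range(len(stanje[vrsta]))' loop body, with the enclosing row,
-- the next row (stanje[vrsta+1], default [] when out of range) and 'vrsta < len(stanje)-1'
-- passed in from the outer loop
def pvInnerA (row nrow : List (Option Int)) (hasNext : Bool) (s : Int × Int × Int) :
    Int × Int × Int :=
  (PySem.List.pyRange 0 (row.length : Int) 1).foldl (fun s kolona =>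
    let c := PySem.List.pyGetD row kolona none
    let s :=
      if kolona < (row.length : Int) - 1 then
        let cr := PySem.List.pyGetD row (kolona + 1) none
        if c == some 1 && cr == some 1 then (s.1 + 1, s.2.1, s.2.2)
        else if c == some 0 && cr == some 0 then (s.1, s.2.1 + 1, s.2.2)
        else s
      else s
    let s :=
      if hasNext then
        let cd := PySem.List.pyGetD nrow kolona none
        if c == some 1 && cd == some 1 then (s.1 + 1, s.2.1, s.2.2)
        else if hasNext && c == some 0 && cd == some 0 then (s.1, s.2.1 + 1, s.2.2)
        else s
      else s
    if c == none then (s.1, s.2.1, s.2.2 + 1) else s) s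

def odredi_heuristiku2 (stanje : List (List (Option Int))) (x_max : Bool) : Int :=
  let n : Int := stanje.length
  let res := (PySem.List.pyRange 0 n 1).foldl (fun (s : Int × Int × Int) vrsta =>
    pvInnerA (PySem.List.pyGetD stanje vrsta [])
      (PySem.List.pyGetD stanje (vrsta + 1) []) (decide (vrsta < n - 1)) s) (0, 0, 0)
  if x_max == true then (res.1 - res.2.1) * res.2.2 else (res.2.1 - res.1) * res.2.2

-- ===== PORT B =====
-- the inner 'while j < n and linija[j] == v' walk: length of the leading run of v
-- in the suffix after position i, together with the remaining suffix (index j onwards)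
def pvRunSplit (v : Option Int) : List (Option Int) → Nat × List (Option Int)
  | [] => (0, [])
  | c :: t => if c == v then ((pvRunSplit v t).1 + 1, (pvRunSplit v t).2) else (0, c :: t)

theorem pvRunSplit_length (v : Option Int) :
    ∀ t : List (Option Int), (pvRunSplit v t).2.length ≤ t.length := by
  intro t
  induction t with
  | nil => simp [pvRunSplit]
  | cons c t ih =>
    by_cases h : (c == v) = true <;> simp [pvRunSplit, h] <;> omega

-- Source B's _parovi_linije: the outer 'while i < n' loop, run by run, accumulating (x, o)
def pvLineRunsAux : List (Option Int) → Int × Int → Int × Int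
  | [], s => s
  | v :: t, s =>
    pvLineRunsAux (pvRunSplit v t).2
      (if v == some 1 then (s.1 + ((pvRunSplit v t).1 : Int), s.2)
       else if v == some 0 then (s.1, s.2 + ((pvRunSplit v t).1 : Int))
       else s)
termination_by l _ => l.length
decreasing_by
  have := pvRunSplit_length v t
  simp only [List.length_cons]
  omega

def pvLineRuns (linija : List (Option Int)) : Int × Int := pvLineRunsAux linija (0, 0)

-- the comprehension '[r[j] for r in stanje if j < len(r)]'
def pvKolona (stanje : List (List (Option Int))) (j : Nat) : List (Option Int) :=
  stanje.filterMap (fun r => r[j]?)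

def odredi_heuristiku2_alt (stanje : List (List (Option Int))) (x_max : Bool) : Int :=
  -- horizontal pairs: run-length encode each row
  let s1 := stanje.foldl (fun (s : Int × Int) linija =>
    let d := pvLineRuns linija; (s.1 + d.1, s.2 + d.2)) ((0 : Int), (0 : Int))
  -- max_k
  let maxk := stanje.foldl (fun (m : Nat) r => if r.length > m then r.length else m) 0
  -- vertical pairs: materialise each column, run-length encode it
  let s2 := (PySem.List.pyRange 0 (maxk : Int) 1).foldl (fun (s : Int × Int) j =>
    let d := pvLineRuns (pvKolona stanje j.toNat); (s.1 + d.1, s.2 + d.2)) s1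
  -- empty cells
  let prazna : Int := stanje.foldl (fun (p : Int) r => p + (PySem.List.count r none : Int)) 0
  let razl := s2.1 - s2.2
  if x_max == true then razl * prazna else -razl * prazna

-- ===== PRECONDITION & SPEC =====
-- Pre_ excludes exactly the jagged grids on which the Python A raises IndexError: a cell equal
-- to 0 or 1 whose column does not exist in the next row is read as stanje[vrsta+1][kolona].
def Pre_odredi_heuristiku2 (stanje : List (List (Option Int))) (x_max : Bool) : Prop :=
  ∀ p ∈ stanje.zip (stanje.drop 1), ∀ j ∈ List.range p.1.length,
    (p.1.getD j none = some 0 ∨ p.1.getD j none = some 1) → j < p.2.length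
instance (stanje : List (List (Option Int))) (x_max : Bool) : Decidable (Pre_odredi_heuristiku2 stanje x_max) := by unfold Pre_odredi_heuristiku2; infer_instance

def pvWitness_odredi_heuristiku2 : List (List (Option Int)) × Bool :=
  ([[some 1, some 1], [some 1, none]], true)

def Spec_odredi_heuristiku2 (stanje : List (List (Option Int))) (x_max : Bool) (out : Int) : Prop := out = odredi_heuristiku2_alt stanje x_max
instance (stanje : List (List (Option Int))) (x_max : Bool) (out : Int) : Decidable (Spec_odredi_heuristiku2 stanje x_max out) := by unfold Spec_odredi_heuristiku2; infer_instance

-- ===== CLAIM (what is proved, stated in full; the proofs are below) =====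
def Claim_equal_odredi_heuristiku2 : Prop := ∀ (stanje : List (List (Option Int))) (x_max : Bool), Dom_odredi_heuristiku2 stanje x_max → Pre_odredi_heuristiku2 stanje x_max → Spec_odredi_heuristiku2 stanje x_max (odredi_heuristiku2 stanje x_max)

-- ===== LEMMAS AND PROOFS =====

-- adjacent-pair counter (proof-side normal form both algorithms are reduced to)
def pvBroji (parovi : List (Option Int × Option Int)) : Int × Int :=
  parovi.foldl (fun s p =>
    if p.1 == some 1 && p.2 == some 1 then (s.1 + 1, s.2)
    else if p.1 == some 0 && p.2 == some 0 then (s.1, s.2 + 1)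
    else s) (0, 0)

def pvP (l : List (Option Int)) : Int × Int := pvBroji (l.zip (l.drop 1))

def pvContr (a b : Option Int) : Int × Int :=
  ((if a == some 1 && b == some 1 then (1 : Int) else 0),
   (if a == some 0 && b == some 0 then (1 : Int) else 0))

def pvContrH (a : Option Int) (l : List (Option Int)) : Int × Int :=
  match l with
  | [] => (0, 0)
  | b :: _ => pvContr a b

theorem broji_shift (parovi : List (Option Int × Option Int)) :
    ∀ (s : Int × Int),
      parovi.foldl (fun s p =>
        if p.1 == some 1 && p.2 == some 1 then (s.1 + 1, s.2)
        else if p.1 == some 0 && p.2 == some 0 then (s.1, s.2 + 1)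
        else s) s
      = (s.1 + (pvBroji parovi).1, s.2 + (pvBroji parovi).2) := by
  induction parovi with
  | nil => intro s; simp [pvBroji]
  | cons p t ih =>
    intro s
    have hc : pvBroji (p :: t)
        = t.foldl (fun s p =>
            if p.1 == some 1 && p.2 == some 1 then (s.1 + 1, s.2)
            else if p.1 == some 0 && p.2 == some 0 then (s.1, s.2 + 1)
            else s)
          (if p.1 == some 1 && p.2 == some 1 then ((0 : Int) + 1, (0 : Int))
           else if p.1 == some 0 && p.2 == some 0 then ((0 : Int), (0 : Int) + 1)
           else ((0 : Int), (0 : Int))) := rfl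
    rw [List.foldl_cons, ih, hc, ih]
    split_ifs <;> (refine Prod.ext ?_ ?_ <;> simp <;> ring)

theorem broji_cons (p : Option Int × Option Int) (l : List (Option Int × Option Int)) :
    pvBroji (p :: l) = pvContr p.1 p.2 + pvBroji l := by
  have hc : pvBroji (p :: l)
      = l.foldl (fun s p =>
          if p.1 == some 1 && p.2 == some 1 then (s.1 + 1, s.2)
          else if p.1 == some 0 && p.2 == some 0 then (s.1, s.2 + 1)
          else s)
        (if p.1 == some 1 && p.2 == some 1 then ((0 : Int) + 1, (0 : Int))
         else if p.1 == some 0 && p.2 == some 0 then ((0 : Int), (0 : Int) + 1)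
         else ((0 : Int), (0 : Int))) := rfl
  rw [hc]
  unfold pvContr
  split_ifs with h1 h2 <;> rw [broji_shift] <;>
    refine Prod.ext ?_ ?_ <;> simp [h1] <;> simp_all <;> ring

theorem brojiSum (l : List (Option Int × Option Int)) :
    pvBroji l = (l.map (fun p => pvContr p.1 p.2)).sum := by
  induction l with
  | nil => simp [pvBroji]
  | cons p t ih => rw [broji_cons, ih]; simp

theorem contr_ne (a b : Option Int) (h : a ≠ b) : pvContr a b = (0, 0) := by
  unfold pvContr
  by_cases e1 : (a == some 1 && b == some 1) = true
  · simp only [Bool.and_eq_true, beq_iff_eq] at e1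
    exact absurd (e1.1.trans e1.2.symm) h
  by_cases e0 : (a == some 0 && b == some 0) = true
  · simp only [Bool.and_eq_true, beq_iff_eq] at e0
    exact absurd (e0.1.trans e0.2.symm) h
  simp [e1, e0]

theorem contr_not01 (a b : Option Int) (h0 : a ≠ some 0) (h1 : a ≠ some 1) :
    pvContr a b = (0, 0) := by
  unfold pvContr
  by_cases e1 : (a == some 1 && b == some 1) = true
  · simp only [Bool.and_eq_true, beq_iff_eq] at e1
    exact absurd e1.1 h1
  by_cases e0 : (a == some 0 && b == some 0) = true
  · simp only [Bool.and_eq_true, beq_iff_eq] at e0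
    exact absurd e0.1 h0
  simp [e1, e0]

theorem contrH_not01 (a : Option Int) (l : List (Option Int)) (h0 : a ≠ some 0)
    (h1 : a ≠ some 1) : pvContrH a l = (0, 0) := by
  cases l with
  | nil => rfl
  | cons b t => exact contr_not01 a b h0 h1

theorem P_cons (a : Option Int) (l : List (Option Int)) :
    pvP (a :: l) = pvContrH a l + pvP l := by
  cases l with
  | nil => simp [pvP, pvContrH, pvBroji]
  | cons b t =>
    have hz : (a :: b :: t).zip ((a :: b :: t).drop 1) = (a, b) :: ((b :: t).zip t) := by simp
    rw [pvP, hz, broji_cons]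
    rfl

-- peeling one run off the front of a line
theorem runSplit_P (v : Option Int) :
    ∀ t : List (Option Int),
      pvP (v :: t)
      = ((if v == some 1 then ((pvRunSplit v t).1 : Int) else 0),
         (if v == some 0 then ((pvRunSplit v t).1 : Int) else 0)) + pvP (pvRunSplit v t).2 := by
  intro t
  induction t with
  | nil =>
    simp [pvRunSplit, pvP, pvBroji]
  | cons c t' ih =>
    by_cases hc : (c == v) = true
    · have hcv : c = v := by simpa using hc
      subst hcv
      rw [P_cons]
      have hrs : pvRunSplit c (c :: t') = ((pvRunSplit c t').1 + 1, (pvRunSplit c t').2) := by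
        simp [pvRunSplit]
      rw [hrs, ih]
      simp only [pvContrH]
      unfold pvContr
      refine Prod.ext ?_ ?_ <;> split_ifs <;> simp_all <;> push_cast <;> ring
    · have hcv : c ≠ v := by simpa using hc
      have hrs : pvRunSplit v (c :: t') = (0, c :: t') := by simp [pvRunSplit, hc]
      rw [hrs, P_cons]
      simp only [pvContrH]
      rw [contr_ne v c (fun h => hcv h.symm)]
      refine Prod.ext ?_ ?_ <;> split_ifs <;> simp

theorem lineRunsAux_spec :
    ∀ (n : Nat) (l : List (Option Int)) (s : Int × Int),
      l.length ≤ n → pvLineRunsAux l s = s + pvP l := by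
  intro n
  induction n with
  | zero =>
    intro l s hl
    have : l = [] := by cases l <;> simp_all
    subst this
    simp [pvLineRunsAux, pvP, pvBroji]
  | succ n ih =>
    intro l s hl
    cases l with
    | nil => simp [pvLineRunsAux, pvP, pvBroji]
    | cons v t =>
      rw [pvLineRunsAux]
      have hlen : (pvRunSplit v t).2.length ≤ n := by
        have := pvRunSplit_length v t
        simp at hl
        omega
      rw [ih _ _ hlen, runSplit_P]
      by_cases h1 : v = some 1
      · subst h1; refine Prod.ext ?_ ?_ <;> simp <;> ring
      by_cases h0 : v = some 0
      · subst h0; refine Prod.ext ?_ ?_ <;> simp <;> ring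
      refine Prod.ext ?_ ?_ <;> simp [h1, h0]

theorem lineRuns_eq_P (l : List (Option Int)) : pvLineRuns l = pvP l := by
  rw [pvLineRuns, lineRunsAux_spec l.length l (0, 0) le_rfl]
  simp

-- total contributions of the grid, structurally
def totH : List (List (Option Int)) → Int × Int
  | [] => (0, 0)
  | r :: t => pvP r + totH t

def totV : List (List (Option Int)) → Int × Int
  | [] => (0, 0)
  | [_] => (0, 0)
  | r1 :: r2 :: t => pvBroji (r1.zip r2) + totV (r2 :: t)

def totP (stanje : List (List (Option Int))) : Int :=
  (stanje.map (fun vrsta => (vrsta.countP (fun c => c == none) : Int))).sum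

-- ===== A-side characterisation (fused loop → totH/totV/totP) =====

def pairedRec {α β γ : Type} (G : β → α → α → γ → Bool → β) (dx : α) (dy : γ) :
    List α → List γ → β → β
  | [], _, s => s
  | [a], ys, s => G s a dx (ys.headD dy) false
  | a :: b :: t, ys, s => pairedRec G dx dy (b :: t) (ys.drop 1) (G s a b (ys.headD dy) true)

theorem getD_drop_one {γ : Type} (ys : List γ) (k : Nat) (dy : γ) :
    ys.getD (k + 1) dy = (ys.drop 1).getD k dy := by
  cases ys <;> simp [List.getD]

theorem master_nat {α β γ : Type} (G : β → α → α → γ → Bool → β) (dx : α) (dy : γ) :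
    ∀ (xs : List α) (ys : List γ) (s : β),
      (List.range xs.length).foldl
        (fun s k => G s (xs.getD k dx) (xs.getD (k + 1) dx) (ys.getD k dy)
          (decide (k + 1 < xs.length))) s
      = pairedRec G dx dy xs ys s := by
  intro xs
  induction xs with
  | nil => intro ys s; simp [pairedRec]
  | cons a t ih =>
    intro ys s
    rw [List.length_cons, List.range_succ_eq_map, List.foldl_cons, List.foldl_map]
    rw [PySem.List.foldl_congr_mem _ _
      (fun s k => G s (t.getD k dx) (t.getD (k + 1) dx) ((ys.drop 1).getD k dy)
        (decide (k + 1 < t.length))) _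
      (by intro acc k hk
          simp only [Nat.succ_eq_add_one]
          rw [getD_drop_one ys k dy]
          simp only [List.getD_cons_succ]
          have hdec : decide (k + 1 + 1 < t.length + 1) = decide (k + 1 < t.length) := by
            simp only [decide_eq_decide]; omega
          rw [hdec])]
    cases t with
    | nil => cases ys <;> simp [pairedRec, List.getD]
    | cons b t' =>
      rw [ih (ys.drop 1)]
      cases ys <;> simp [pairedRec, List.getD]

theorem master {α β γ : Type} (G : β → α → α → γ → Bool → β) (dx : α) (dy : γ)
    (xs : List α) (ys : List γ) (s : β) :
    (PySem.List.pyRange 0 (xs.length : Int) 1).foldl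
      (fun s k => G s (PySem.List.pyGetD xs k dx) (PySem.List.pyGetD xs (k + 1) dx)
        (PySem.List.pyGetD ys k dy) (decide (k < (xs.length : Int) - 1))) s
    = pairedRec G dx dy xs ys s := by
  rw [PySem.List.pyRange_one, List.foldl_map]
  simp only [zero_add, Int.sub_zero, Int.toNat_natCast]
  rw [← master_nat G dx dy xs ys s]
  apply PySem.List.foldl_congr_mem
  intro acc k hk
  have h2 : ((k : Int) + 1) = ((k + 1 : Nat) : Int) := by push_cast; ring
  rw [h2, PySem.List.pyGetD_natCast, PySem.List.pyGetD_natCast, PySem.List.pyGetD_natCast]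
  congr 1
  simp only [decide_eq_decide]
  omega

def pvGinner (b : Bool) (s : Int × Int × Int) (c cr : Option Int) (cd : Option Int)
    (notLast : Bool) : Int × Int × Int :=
  let s :=
    if notLast then
      if c == some 1 && cr == some 1 then (s.1 + 1, s.2.1, s.2.2)
      else if c == some 0 && cr == some 0 then (s.1, s.2.1 + 1, s.2.2)
      else s
    else s
  let s :=
    if b then
      if c == some 1 && cd == some 1 then (s.1 + 1, s.2.1, s.2.2)
      else if b && c == some 0 && cd == some 0 then (s.1, s.2.1 + 1, s.2.2)
      else s
    else s
  if c == none then (s.1, s.2.1, s.2.2 + 1) else s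

theorem broji_cons' (p : Option Int × Option Int) (l : List (Option Int × Option Int)) :
    pvBroji (p :: l)
    = ((if p.1 == some 1 && p.2 == some 1 then 1 else 0) + (pvBroji l).1,
       (if p.1 == some 0 && p.2 == some 0 then 1 else 0) + (pvBroji l).2) := by
  rw [broji_cons]
  unfold pvContr
  split_ifs <;> refine Prod.ext ?_ ?_ <;> simp <;> ring

set_option maxHeartbeats 2000000 in
theorem pairedRec_inner_char (b : Bool) :
    ∀ (row nrow : List (Option Int)) (s : Int × Int × Int),
      pairedRec (pvGinner b) none none row nrow s
      = (s.1 + (pvBroji (row.zip (row.drop 1))).1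
           + (if b then (pvBroji (row.zip nrow)).1 else 0),
         s.2.1 + (pvBroji (row.zip (row.drop 1))).2
           + (if b then (pvBroji (row.zip nrow)).2 else 0),
         s.2.2 + (row.countP (fun c => c == none) : Int)) := by
  intro row
  induction row with
  | nil => intro nrow s; simp [pairedRec, pvBroji]
  | cons a t ih =>
    intro nrow s
    cases t with
    | nil =>
      cases nrow with
      | nil =>
        simp only [pairedRec, pvGinner, pvBroji, List.zip_nil_right, List.headD,
          List.foldl_nil, List.countP_cons, List.countP_nil]
        cases b <;> simp <;> split_ifs <;> simp
      | cons c nt =>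
        simp only [pairedRec, List.headD, List.zip_cons_cons, List.zip_nil_right,
          List.drop_succ_cons, List.drop_nil, List.countP_cons, List.countP_nil]
        rw [broji_cons']
        simp only [pvGinner, pvBroji, List.zip_nil_right, List.foldl_nil]
        cases b <;> simp <;> split_ifs <;> simp_all <;> omega
    | cons a2 t2 =>
      have step : pairedRec (pvGinner b) none none (a :: a2 :: t2) nrow s
          = pairedRec (pvGinner b) none none (a2 :: t2) (nrow.drop 1)
              (pvGinner b s a a2 (nrow.headD none) true) := rfl
      rw [step, ih]
      have hzH : (a :: a2 :: t2).zip ((a :: a2 :: t2).drop 1)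
          = (a, a2) :: ((a2 :: t2).zip ((a2 :: t2).drop 1)) := by simp
      rw [hzH, broji_cons']
      cases nrow with
      | nil =>
        simp only [List.drop_nil, List.headD, List.zip_nil_right, List.countP_cons]
        simp only [pvGinner, pvBroji, List.foldl_nil]
        cases b <;> simp <;> split_ifs <;> simp_all <;> push_cast <;> omega
      | cons c nt =>
        have hzV : (a :: a2 :: t2).zip (c :: nt) = (a, c) :: ((a2 :: t2).zip nt) := by simp
        rw [hzV, broji_cons']
        simp only [pvGinner, List.headD, List.drop_succ_cons, List.countP_cons]
        cases b <;> simp <;> split_ifs <;> simp_all <;> push_cast <;> omega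

theorem innerA_eq_pairedRec (row nrow : List (Option Int)) (b : Bool) (s : Int × Int × Int) :
    pvInnerA row nrow b s = pairedRec (pvGinner b) none none row nrow s := by
  unfold pvInnerA
  rw [← master (pvGinner b) none none row nrow s]
  apply PySem.List.foldl_congr_mem
  intro acc k hk
  by_cases h : k < (row.length : Int) - 1
  · simp [pvGinner, h]
  · simp [pvGinner, h]

theorem pairedRec_outer_char :
    ∀ (stanje : List (List (Option Int))) (ys : List Unit) (s : Int × Int × Int),
      pairedRec (fun (s : Int × Int × Int) row nrow (_ : Unit) b => pvInnerA row nrow b s)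
        [] () stanje ys s
      = (s.1 + (totH stanje).1 + (totV stanje).1,
         s.2.1 + (totH stanje).2 + (totV stanje).2,
         s.2.2 + totP stanje) := by
  intro stanje
  induction stanje with
  | nil => intro ys s; simp [pairedRec, totH, totV, totP]
  | cons r t ih =>
    intro ys s
    cases t with
    | nil =>
      simp only [pairedRec, innerA_eq_pairedRec, pairedRec_inner_char, totH, totV, totP, pvP]
      simp
    | cons r2 t2 =>
      have step : pairedRec (fun (s : Int × Int × Int) row nrow (_ : Unit) b => pvInnerA row nrow b s)
            [] () (r :: r2 :: t2) ys s
          = pairedRec (fun (s : Int × Int × Int) row nrow (_ : Unit) b => pvInnerA row nrow b s)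
            [] () (r2 :: t2) (ys.drop 1) (pvInnerA r r2 true s) := rfl
      rw [step, ih, innerA_eq_pairedRec, pairedRec_inner_char]
      simp only [totH, totV, totP, pvP, List.map_cons, List.sum_cons, if_pos]
      refine Prod.ext ?_ (Prod.ext ?_ ?_) <;> simp [Prod.fst_add, Prod.snd_add] <;> ring

theorem a_char (stanje : List (List (Option Int))) (x_max : Bool) :
    odredi_heuristiku2 stanje x_max
    = if x_max then ((totH stanje).1 + (totV stanje).1 - ((totH stanje).2 + (totV stanje).2)) * totP stanje
      else (((totH stanje).2 + (totV stanje).2) - ((totH stanje).1 + (totV stanje).1)) * totP stanje := by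
  have hM := master (fun (s : Int × Int × Int) row nrow (_ : Unit) b => pvInnerA row nrow b s)
    [] () stanje ([] : List Unit) ((0 : Int), (0 : Int), (0 : Int))
  simp only [] at hM
  unfold odredi_heuristiku2
  simp only []
  rw [hM, pairedRec_outer_char]
  cases x_max <;> simp <;> ring_nf

-- ===== B-side characterisation (run-length passes → totH/totV/totP) =====

theorem alt_pass1 (stanje : List (List (Option Int))) :
    ∀ (s : Int × Int),
      stanje.foldl (fun (s : Int × Int) vrsta =>
        let d := pvLineRuns vrsta; (s.1 + d.1, s.2 + d.2)) s
      = (s.1 + (totH stanje).1, s.2 + (totH stanje).2) := by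
  induction stanje with
  | nil => intro s; simp [totH]
  | cons r t ih =>
    intro s
    rw [List.foldl_cons, ih]
    simp only [totH, lineRuns_eq_P]
    refine Prod.ext ?_ ?_ <;> simp [Prod.fst_add, Prod.snd_add] <;> ring

-- the max_k loop bounds every row length
theorem maxk_bound (stanje : List (List (Option Int))) :
    ∀ (m : Nat),
      m ≤ stanje.foldl (fun (m : Nat) r => if r.length > m then r.length else m) m ∧
      ∀ r ∈ stanje, r.length ≤ stanje.foldl (fun (m : Nat) r => if r.length > m then r.length else m) m := by
  induction stanje with
  | nil => intro m; simp
  | cons a t ih =>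
    intro m
    simp only [List.foldl_cons, List.mem_cons]
    have h := ih (if a.length > m then a.length else m)
    constructor
    · have : m ≤ if a.length > m then a.length else m := by split_ifs <;> omega
      omega
    · intro r hr
      rcases hr with rfl | hr
      · have : r.length ≤ if r.length > m then r.length else m := by split_ifs <;> omega
        omega
      · exact h.2 r hr

-- sum of a function over the columns
def colSum (M : Nat) (stanje : List (List (Option Int))) : Int × Int :=
  ((List.range M).map (fun j => pvP (pvKolona stanje j))).sum

theorem alt_pass2 (stanje : List (List (Option Int))) (M : Nat) :
    ∀ (s : Int × Int),
      (PySem.List.pyRange 0 (M : Int) 1).foldl (fun (s : Int × Int) j =>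
        let d := pvLineRuns (pvKolona stanje j.toNat); (s.1 + d.1, s.2 + d.2)) s
      = (s.1 + (colSum M stanje).1, s.2 + (colSum M stanje).2) := by
  rw [PySem.List.pyRange_one]
  simp only [zero_add, Int.sub_zero, Int.toNat_natCast, List.foldl_map]
  induction M with
  | zero => intro s; simp [colSum]
  | succ n ih =>
    intro s
    rw [List.range_succ, List.foldl_append]
    rw [ih]
    simp only [List.foldl_cons, List.foldl_nil, Int.toNat_natCast, colSum,
      List.range_succ, List.map_append, List.sum_append, lineRuns_eq_P]
    refine Prod.ext ?_ ?_ <;> simp [Prod.fst_add, Prod.snd_add] <;> ring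

-- generic: sum over range M of an (get?)-indexed list with M ≥ length
theorem sum_range_get? (f : Option Int × Option Int → Int × Int) :
    ∀ (l : List (Option Int × Option Int)) (M : Nat), l.length ≤ M →
      ((List.range M).map (fun j => (l[j]?).elim ((0 : Int), (0 : Int)) f)).sum
      = (l.map f).sum := by
  intro l
  induction l with
  | nil =>
    intro M _
    simp
  | cons p t ih =>
    intro M hM
    cases M with
    | zero => simp at hM
    | succ n =>
      rw [List.range_succ_eq_map]
      simp only [List.map_cons, List.map_map, List.sum_cons]
      have ht : t.length ≤ n := by simp at hM; omega
      rw [show ((fun j => ((p :: t)[j]?).elim ((0 : Int), (0 : Int)) f) ∘ Nat.succ)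
          = (fun j => (t[j]?).elim ((0 : Int), (0 : Int)) f) from rfl]
      rw [ih n ht]
      simp

theorem colSum_zero (M : Nat) : colSum M [] = (0, 0) := by
  unfold colSum pvKolona
  induction M with
  | zero => simp; rfl
  | succ n ih => rw [List.range_succ]; simp_all [pvP, pvBroji]

theorem kolona_cons (r : List (Option Int)) (t : List (List (Option Int))) (j : Nat) :
    pvKolona (r :: t) j
    = match r[j]? with
      | some a => a :: pvKolona t j
      | none => pvKolona t j := by
  simp only [pvKolona, List.filterMap_cons]
  cases r[j]? <;> rfl

-- sum over Int × Int splits over pointwise addition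
theorem sum_map_add_pair {α : Type} (l : List α) (f g : α → Int × Int) :
    (l.map (fun x => f x + g x)).sum = (l.map f).sum + (l.map g).sum := by
  induction l with
  | nil => simp
  | cons a t ih =>
    simp only [List.map_cons, List.sum_cons, ih]
    refine Prod.ext ?_ ?_ <;> simp [Prod.fst_add, Prod.snd_add] <;> ring

theorem colSum_cons (r1 : List (Option Int)) (rest : List (List (Option Int))) (M : Nat) :
    colSum M (r1 :: rest)
    = ((List.range M).map (fun j =>
        match r1[j]? with
        | some a => pvContrH a (pvKolona rest j)
        | none => ((0 : Int), (0 : Int)))).sum + colSum M rest := by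
  unfold colSum
  rw [← sum_map_add_pair]
  congr 1
  apply List.map_congr_left
  intro j _
  rw [kolona_cons]
  cases h : r1[j]? with
  | none => simp
  | some a => simp [P_cons]

-- the per-column head contribution of the first row equals its zipped pairs with the
-- second row, under the no-IndexError precondition for that pair of rows
theorem head_contrib (r1 r2 : List (Option Int)) (t : List (List (Option Int)))
    (hpre : ∀ j ∈ List.range r1.length,
      (r1.getD j none = some 0 ∨ r1.getD j none = some 1) → j < r2.length)
    (M : Nat) (hM : r1.length ≤ M) :
    ((List.range M).map (fun j =>
        match r1[j]? with
        | some a => pvContrH a (pvKolona (r2 :: t) j)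
        | none => ((0 : Int), (0 : Int)))).sum
    = pvBroji (r1.zip r2) := by
  rw [brojiSum]
  rw [← sum_range_get? (fun p => pvContr p.1 p.2) (r1.zip r2) M
    (by rw [List.length_zip]; omega)]
  congr 1
  apply List.map_congr_left
  intro j _
  by_cases hj1 : j < r1.length
  · have hr1 : r1[j]? = some r1[j] := by simp [hj1]
    rw [hr1]
    by_cases hj2 : j < r2.length
    · have hz : (r1.zip r2)[j]? = some (r1[j], r2[j]) := by
        simp [List.getElem?_zip_eq_some, hj1, hj2]
      rw [hz]
      have hk : pvKolona (r2 :: t) j = r2[j] :: pvKolona t j := by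
        rw [kolona_cons]
        simp [hj2]
      rw [hk]
      rfl
    · -- r1[j] cannot be 0 or 1, so both sides vanish
      have hno : ¬ (r1.getD j none = some 0 ∨ r1.getD j none = some 1) := by
        intro h
        exact hj2 (hpre j (List.mem_range.mpr hj1) h)
      have hg : r1.getD j none = r1[j] := by simp [List.getD, hj1]
      rw [hg] at hno
      have hz : (r1.zip r2)[j]? = none := by
        simp [List.getElem?_eq_none_iff, List.length_zip]
        omega
      rw [hz]
      simpa using contrH_not01 r1[j] (pvKolona (r2 :: t) j)
        (fun h => hno (Or.inl h)) (fun h => hno (Or.inr h))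
  · have hr1 : r1[j]? = none := by
      simp [List.getElem?_eq_none_iff]; omega
    have hz : (r1.zip r2)[j]? = none := by
      simp [List.getElem?_eq_none_iff, List.length_zip]; omega
    rw [hr1, hz]
    rfl

-- rows whose cells are never 0/1 beyond the grid contribute nothing spurious:
-- columns of a one-row grid have no adjacent pairs
theorem colSum_single (r : List (Option Int)) (M : Nat) : colSum M [r] = (0, 0) := by
  rw [colSum_cons, colSum_zero]
  have h0 : ∀ j ∈ List.range M,
      (match r[j]? with
        | some a => pvContrH a (pvKolona ([] : List (List (Option Int))) j)
        | none => ((0 : Int), (0 : Int))) = ((0 : Int), (0 : Int)) := by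
    intro j _
    cases r[j]? with
    | none => rfl
    | some a => simp [pvKolona, pvContrH]
  rw [List.map_congr_left h0]
  simp

theorem colSum_eq_totV :
    ∀ (stanje : List (List (Option Int))),
      (∀ p ∈ stanje.zip (stanje.drop 1), ∀ j ∈ List.range p.1.length,
        (p.1.getD j none = some 0 ∨ p.1.getD j none = some 1) → j < p.2.length) →
      ∀ M, (∀ r ∈ stanje, r.length ≤ M) → colSum M stanje = totV stanje := by
  intro stanje
  induction stanje with
  | nil => intro _ M _; simp [colSum_zero, totV]
  | cons r1 rest ih =>
    intro hpre M hM
    cases rest with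
    | nil => simp [colSum_single, totV]
    | cons r2 t =>
      have hzip : (r1 :: r2 :: t).zip ((r1 :: r2 :: t).drop 1)
          = (r1, r2) :: ((r2 :: t).zip ((r2 :: t).drop 1)) := by simp
      rw [hzip] at hpre
      have hpre1 := hpre (r1, r2) (List.mem_cons_self ..)
      have hpre2 : ∀ p ∈ (r2 :: t).zip ((r2 :: t).drop 1), ∀ j ∈ List.range p.1.length,
          (p.1.getD j none = some 0 ∨ p.1.getD j none = some 1) → j < p.2.length := by
        intro p hp
        exact hpre p (List.mem_cons_of_mem _ hp)
      rw [colSum_cons, head_contrib r1 r2 t hpre1 M (hM r1 (List.mem_cons_self ..)),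
        ih hpre2 M (fun r hr => hM r (List.mem_cons_of_mem _ hr))]
      rfl

-- the empty-cell pass
theorem prazna_pass (stanje : List (List (Option Int))) :
    ∀ (p : Int),
      stanje.foldl (fun (p : Int) r => p + (PySem.List.count r none : Int)) p
      = p + totP stanje := by
  induction stanje with
  | nil => intro p; simp [totP]
  | cons r t ih =>
    intro p
    simp only [List.foldl_cons, ih, totP, List.map_cons, List.sum_cons]
    have : PySem.List.count r none = r.countP (fun c => c == none) := by
      rw [PySem.List.count_eq, List.count_eq_countP]
    rw [this]
    ring

theorem alt_char (stanje : List (List (Option Int))) (x_max : Bool)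
    (hpre : Pre_odredi_heuristiku2 stanje x_max) :
    odredi_heuristiku2_alt stanje x_max
    = if x_max then ((totH stanje).1 + (totV stanje).1 - ((totH stanje).2 + (totV stanje).2)) * totP stanje
      else (((totH stanje).2 + (totV stanje).2) - ((totH stanje).1 + (totV stanje).1)) * totP stanje := by
  unfold odredi_heuristiku2_alt
  simp only []
  rw [alt_pass1, alt_pass2, prazna_pass,
    colSum_eq_totV stanje hpre _ (fun r hr => (maxk_bound stanje 0).2 r hr)]
  cases x_max <;> simp <;> ring_nf

-- ===== VERDICT (by name: the statement is the Claim_ definition above) =====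
theorem odredi_heuristiku2_spec : Claim_equal_odredi_heuristiku2 := by
  intro stanje x_max _ hpre
  unfold Spec_odredi_heuristiku2
  rw [a_char, alt_char stanje x_max hpre]
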